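-- pv_equiv track=rewrite | github.com/Southpaw-TACTIC/TACTIC | src/tactic/ui/tools/custom_layout_edit_wdg.py | new_view
-- ===== SOURCE A (Python) =====
-- def new_view(view, new_folder):
--     if view.startswith("."):
--         return view
--
--     count = view.count('.')
--     parts = view.split(".")
--     for i in range(0, count):
--         parts.pop(0)
--     parts.insert(0, new_folder)
--     new_view = ".".join(parts)
--
--     return new_view
-- ===== SOURCE B (Python) =====
-- def new_view(view, new_folder):
--     if view.startswith("."):
--         return view
--     return new_folder + "." + view.rsplit(".", 1)[-1]
-- ===== Notes on version B (the rewrite author's own statement) =====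
-- stated objective: simpler
-- what changed: Replaces the count/split/pop-loop/insert/join pipeline with a single expression that keeps the leading-dot guard and concatenates new_folder, '.', and the last dotted component obtained by rsplit.
import Mathlib
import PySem

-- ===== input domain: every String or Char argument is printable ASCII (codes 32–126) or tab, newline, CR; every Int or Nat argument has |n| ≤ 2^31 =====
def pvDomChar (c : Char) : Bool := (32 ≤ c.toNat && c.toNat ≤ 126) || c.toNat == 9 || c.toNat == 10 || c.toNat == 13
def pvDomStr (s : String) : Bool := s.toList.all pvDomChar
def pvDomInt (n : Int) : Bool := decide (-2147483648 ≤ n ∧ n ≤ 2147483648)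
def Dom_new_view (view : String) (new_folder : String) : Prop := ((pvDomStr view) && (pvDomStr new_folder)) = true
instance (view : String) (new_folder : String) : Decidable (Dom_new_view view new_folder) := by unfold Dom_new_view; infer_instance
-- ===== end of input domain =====

-- B replaces A's count/split/pop-loop/insert/join pipeline by a single concatenation of
-- new_folder, '.', and the last dotted component (rsplit); objective: simpler.

-- ===== PORT A =====
def new_view (view : String) (new_folder : String) : String :=
  if PySem.Str.startswith view "." then view
  else
    let count := PySem.Str.count view "."
    let parts := (PySem.Str.split? view ".").getD []  -- sep "." ≠ "": split? is always some here
    -- for i in range(0, count): parts.pop(0)  — parts is never empty here, so pop(0) never raises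
    let parts := (PySem.List.pyRange 0 (count : Int)).foldl
      (fun ps _ => ((PySem.List.pop? ps 0).map Prod.snd).getD ps) parts
    let parts := PySem.List.insert parts 0 new_folder
    PySem.Str.join "." parts

-- ===== PORT B =====
def new_view_alt (view : String) (new_folder : String) : String :=
  if PySem.Str.startswith view "." then view
  else
    -- view.rsplit(".", 1)[-1] = the characters after the last '.', the whole string if none:
    -- ported by hand (exact) as the longest dot-free suffix
    String.ofList (new_folder.toList ++ '.' :: (view.toList.reverse.takeWhile (fun c => c != '.')).reverse)

-- ===== PRECONDITION & SPEC =====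
def Spec_new_view (view : String) (new_folder : String) (out : String) : Prop := out = new_view_alt view new_folder
instance (view : String) (new_folder : String) (out : String) : Decidable (Spec_new_view view new_folder out) := by unfold Spec_new_view; infer_instance

-- ===== CLAIM (what is proved, stated in full; the proofs are below) =====
def Claim_equal_new_view : Prop := ∀ (view : String) (new_folder : String), Dom_new_view view new_folder → Spec_new_view view new_folder (new_view view new_folder)

-- ===== LEMMAS AND PROOFS =====

-- specification of Python's s.split('.'): the components, accumulating the current piece in pre
def pvSplit (pre : List Char) : List Char → List (List Char)
  | [] => [pre]
  | c :: rest => if c = '.' then pre :: pvSplit [] rest else pvSplit (pre ++ [c]) rest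

-- the last component of pvSplit pre l
def pvLast (pre : List Char) : List Char → List Char
  | [] => pre
  | c :: rest => if c = '.' then pvLast [] rest else pvLast (pre ++ [c]) rest

theorem pvIsPrefixOf_dot_cons (c : Char) (rest : List Char) (hc : ¬ c = '.') :
    (List.isPrefixOf ['.'] (c :: rest)) = false := by
  rw [Bool.eq_false_iff]
  intro h
  have h2 := List.isPrefixOf_iff_prefix.mp h
  rw [List.cons_prefix_cons] at h2
  exact hc h2.1.symm

theorem pvSplit_go (fuel : Nat) : ∀ (l cur : List Char) (acc : List (List Char)), l.length ≤ fuel →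
    PySem.Chars.splitOn.go ['.'] fuel l cur acc = acc.reverse ++ pvSplit cur.reverse l := by
  induction fuel with
  | zero =>
    intro l cur acc h
    have hl : l = [] := List.eq_nil_of_length_eq_zero (Nat.le_zero.mp h)
    subst hl
    simp [PySem.Chars.splitOn.go, pvSplit]
  | succ n ih =>
    intro l cur acc h
    cases l with
    | nil => simp [PySem.Chars.splitOn.go, pvSplit]
    | cons c rest =>
      by_cases hc : c = '.'
      · subst hc
        rw [show PySem.Chars.splitOn.go ['.'] (n+1) ('.' :: rest) cur acc
              = PySem.Chars.splitOn.go ['.'] n rest [] (cur.reverse :: acc) by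
            simp [PySem.Chars.splitOn.go, List.isPrefixOf]]
        rw [ih rest [] (cur.reverse :: acc) (by simpa using h)]
        simp [pvSplit]
      · rw [show PySem.Chars.splitOn.go ['.'] (n+1) (c :: rest) cur acc
              = PySem.Chars.splitOn.go ['.'] n rest (c :: cur) acc by
            simp only [PySem.Chars.splitOn.go]
            rw [pvIsPrefixOf_dot_cons c rest hc]
            simp]
        rw [ih rest (c :: cur) acc (by simpa using h)]
        simp [pvSplit, hc]

theorem pvCount_go (fuel : Nat) : ∀ (l : List Char) (acc : Nat), l.length ≤ fuel →
    PySem.Chars.count.go ['.'] fuel l acc = acc + l.count '.' := by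
  induction fuel with
  | zero =>
    intro l acc h
    have hl : l = [] := List.eq_nil_of_length_eq_zero (Nat.le_zero.mp h)
    subst hl
    simp [PySem.Chars.count.go]
  | succ n ih =>
    intro l acc h
    cases l with
    | nil => simp [PySem.Chars.count.go]
    | cons c rest =>
      by_cases hc : c = '.'
      · subst hc
        rw [show PySem.Chars.count.go ['.'] (n+1) ('.' :: rest) acc
              = PySem.Chars.count.go ['.'] n rest (acc + 1) by
            simp [PySem.Chars.count.go, List.isPrefixOf]]
        rw [ih rest (acc + 1) (by simpa using h)]
        simp [List.count_cons]
        omega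
      · rw [show PySem.Chars.count.go ['.'] (n+1) (c :: rest) acc
              = PySem.Chars.count.go ['.'] n rest acc by
            simp only [PySem.Chars.count.go]
            rw [pvIsPrefixOf_dot_cons c rest hc]
            simp]
        rw [ih rest acc (by simpa using h)]
        simp [List.count_cons, hc]

theorem pvSplit_length (l : List Char) : ∀ pre, (pvSplit pre l).length = l.count '.' + 1 := by
  induction l with
  | nil => intro pre; simp [pvSplit]
  | cons c rest ih =>
    intro pre
    by_cases hc : c = '.'
    · subst hc; simp [pvSplit, List.count_cons, ih]
    · simp [pvSplit, hc, ih]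

theorem pvSplit_drop (l : List Char) : ∀ pre,
    (pvSplit pre l).drop (l.count '.') = [pvLast pre l] := by
  induction l with
  | nil => intro pre; simp [pvSplit, pvLast]
  | cons c rest ih =>
    intro pre
    by_cases hc : c = '.'
    · subst hc; simp [pvSplit, pvLast, List.count_cons, ih]
    · simp [pvSplit, pvLast, hc, ih]

theorem pvTW_all (rest : List Char) (hd : '.' ∉ rest) :
    List.takeWhile (fun c => c != '.') rest.reverse = rest.reverse := by
  rw [List.takeWhile_eq_self_iff]
  intro x hx
  have hmem : x ∈ rest := List.mem_reverse.mp hx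
  simp only [bne_iff_ne, ne_eq]
  intro hxe; exact hd (hxe ▸ hmem)

theorem pvTW_append (rest : List Char) (c : Char) :
    List.takeWhile (fun c => c != '.') (rest.reverse ++ [c]) =
      if '.' ∈ rest then List.takeWhile (fun c => c != '.') rest.reverse
      else if c = '.' then rest.reverse else rest.reverse ++ [c] := by
  by_cases hd : '.' ∈ rest
  · rw [List.takeWhile_append, if_neg, if_pos hd]
    intro hlen
    have heq := (List.takeWhile_prefix (l := rest.reverse) (fun c => c != '.')).eq_of_length hlen
    have := List.takeWhile_eq_self_iff.mp heq '.' (List.mem_reverse.mpr hd)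
    simp at this
  · have hall := pvTW_all rest hd
    rw [List.takeWhile_append, if_pos (by rw [hall]), hall, if_neg hd]
    by_cases hc : c = '.'
    · subst hc; simp
    · simp [hc]

theorem pvLast_eq (l : List Char) : ∀ pre,
    pvLast pre l = if '.' ∈ l then (List.takeWhile (fun c => c != '.') l.reverse).reverse else pre ++ l := by
  induction l with
  | nil => intro pre; simp [pvLast]
  | cons c rest ih =>
    intro pre
    rw [show (c :: rest).reverse = rest.reverse ++ [c] by simp, pvTW_append rest c]
    by_cases hc : c = '.'
    · subst hc
      rw [show pvLast pre ('.' :: rest) = pvLast [] rest by simp [pvLast], ih []]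
      by_cases hd : '.' ∈ rest
      · simp [hd]
      · simp [hd]
    · have hcc : ('.' : Char) ≠ c := fun h => hc h.symm
      rw [show pvLast pre (c :: rest) = pvLast (pre ++ [c]) rest by simp [pvLast, hc], ih (pre ++ [c])]
      by_cases hd : '.' ∈ rest
      · simp [hd]
      · simp [hd, hcc]

theorem pvFoldPop (is : List Int) : ∀ (xs : List String), is.length < xs.length →
    is.foldl (fun ps _ => ((PySem.List.pop? ps 0).map Prod.snd).getD ps) xs = xs.drop is.length := by
  induction is with
  | nil => intro xs _; simp
  | cons i is ih =>
    intro xs h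
    cases xs with
    | nil => simp at h
    | cons x xs =>
      simp only [List.foldl_cons, PySem.List.pop?_zero_cons, Option.map_some, Option.getD_some]
      rw [ih xs (by simpa using h)]
      simp

-- ===== VERDICT (by name: the statement is the Claim_ definition above) =====
theorem new_view_spec : Claim_equal_new_view := by
  intro view new_folder _
  unfold Spec_new_view new_view new_view_alt
  cases hs : PySem.Str.startswith view "." with
  | true => simp
  | false =>
    simp only [Bool.false_eq_true, if_false]
    show PySem.Str.join "." (PySem.List.insert
        ((PySem.List.pyRange 0 ((PySem.Str.count view "." : Nat) : Int)).foldl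
          (fun ps _ => ((PySem.List.pop? ps 0).map Prod.snd).getD ps)
          ((PySem.Str.split? view ".").getD [])) 0 new_folder) = _
    have hdot : (".":String).toList = ['.'] := rfl
    obtain ⟨ps, hps⟩ : ∃ ps, PySem.Str.split? view "." = some ps := by
      have hm := PySem.Str.split?_map view "."
      cases h : PySem.Str.split? view "." with
      | some ps => exact ⟨ps, rfl⟩
      | none =>
        rw [h] at hm
        simp [PySem.Chars.split?, hdot] at hm
    have hmap : ps.map String.toList = pvSplit [] view.toList := by
      have hm := PySem.Str.split?_map view "."
      rw [hps] at hm
      simp only [Option.map_some, hdot, PySem.Chars.split?, List.isEmpty_cons,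
        Bool.false_eq_true, if_false, Option.some.injEq] at hm
      rw [hm, PySem.Chars.splitOn, pvSplit_go _ _ _ _ (by omega)]
      simp
    have hcount : PySem.Str.count view "." = (view.toList).count '.' := by
      rw [PySem.Str.count, hdot, PySem.Chars.count]
      simp only [List.isEmpty_cons, Bool.false_eq_true, if_false]
      rw [pvCount_go view.toList.length view.toList 0 le_rfl]
      omega
    have hlen : ps.length = view.toList.count '.' + 1 := by
      have hl := congrArg List.length hmap
      simpa [pvSplit_length] using hl
    have hrange : (PySem.List.pyRange 0 ((PySem.Str.count view "." : Nat) : Int)).length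
        = PySem.Str.count view "." := by
      rw [PySem.List.pyRange_zero_natCast]; simp
    rw [hps]
    simp only [Option.getD_some]
    have hfold : (PySem.List.pyRange 0 ((PySem.Str.count view "." : Nat) : Int)).foldl
        (fun ps _ => ((PySem.List.pop? ps 0).map Prod.snd).getD ps) ps
        = ps.drop (PySem.Str.count view ".") := by
      rw [pvFoldPop _ ps (by rw [hrange, hcount, hlen]; omega), hrange]
    rw [hfold, PySem.List.insert_zero, PySem.Str.join]
    have hdropmap : (ps.drop (PySem.Str.count view ".")).map String.toList
        = [pvLast [] view.toList] := by
      rw [List.map_drop, hmap, hcount, pvSplit_drop]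
    congr 1
    cases hdk : ps.drop (PySem.Str.count view ".") with
    | nil => rw [hdk] at hdropmap; simp at hdropmap
    | cons a t =>
      cases t with
      | cons b t' => rw [hdk] at hdropmap; simp at hdropmap
      | nil =>
        rw [hdk] at hdropmap
        simp only [List.map_cons, List.map_nil, List.cons.injEq, and_true] at hdropmap
        simp only [List.map_cons, List.map_nil, hdropmap, PySem.Chars.join, hdot]
        rw [pvLast_eq]
        by_cases hmem : '.' ∈ view.toList
        · simp [hmem, List.intercalate]
        · have htw : (List.takeWhile (fun c => c != '.') view.toList.reverse).reverse = view.toList := by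
            rw [pvTW_all view.toList hmem]; simp
          simp [hmem, htw, List.intercalate]
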